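-- pv_equiv track=rewrite | github.com/maxangeletti/sommelier-ai | backend/main_A9_4_FIXED.py | normalize_sweetness
-- ===== SOURCE A (Python) =====
-- from typing import Any, Dict, List, Optional, Tuple, Iterable
--
-- def _norm(s: Optional[str]) -> str:
--     if s is None:
--         return ""
--     return str(s).strip()
--
-- def _norm_lc(s: Optional[str]) -> str:
--     return _norm(s).lower()
--
-- def normalize_sweetness(s: str) -> str:
--     v = _norm_lc(s)
--     if not v:
--         return ""
--     if any(k in v for k in ["secco", "dry", "brut", "extra brut", "pas dos", "dosage zero", "nature"]):
--         return "secco"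
--     if any(k in v for k in ["abbocc", "off-dry", "off dry"]):
--         return "abboccato"
--     if any(k in v for k in ["amabile", "semi-sweet", "semi sweet"]):
--         return "amabile"
--     if any(k in v for k in ["dolce", "sweet", "demi-sec", "demisec", "doux"]):
--         return "dolce"
--     return v
-- ===== SOURCE B (Python) =====
-- _KW = [("secco", 0), ("dry", 0), ("brut", 0), ("extra brut", 0),
--        ("pas dos", 0), ("dosage zero", 0), ("nature", 0),
--        ("abbocc", 1), ("off-dry", 1), ("off dry", 1),
--        ("amabile", 2), ("semi-sweet", 2), ("semi sweet", 2),
--        ("dolce", 3), ("sweet", 3), ("demi-sec", 3), ("demisec", 3), ("doux", 3)]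
--
-- _LABELS = ["secco", "abboccato", "amabile", "dolce"]
--
-- def normalize_sweetness(s: str) -> str:
--     v = str(s).strip().lower()
--     if not v:
--         return ""
--     best = 4  # 4 = no keyword found anywhere
--     for i in range(len(v)):
--         for kw, pri in _KW:
--             if pri < best and v.startswith(kw, i):
--                 best = pri
--     return _LABELS[best] if best < 4 else v
-- ===== Notes on version B (the rewrite author's own statement) =====
-- stated objective: alternative
-- what changed: Instead of A's keyword-driven cascade of four any()/substring scans with early returns, B scans the text position by position, checks each keyword of a priority table with startswith at that position, and maintains a running minimum priority; the label of the minimum (or the text itself if none matched) is returned at the end.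
import Mathlib
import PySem

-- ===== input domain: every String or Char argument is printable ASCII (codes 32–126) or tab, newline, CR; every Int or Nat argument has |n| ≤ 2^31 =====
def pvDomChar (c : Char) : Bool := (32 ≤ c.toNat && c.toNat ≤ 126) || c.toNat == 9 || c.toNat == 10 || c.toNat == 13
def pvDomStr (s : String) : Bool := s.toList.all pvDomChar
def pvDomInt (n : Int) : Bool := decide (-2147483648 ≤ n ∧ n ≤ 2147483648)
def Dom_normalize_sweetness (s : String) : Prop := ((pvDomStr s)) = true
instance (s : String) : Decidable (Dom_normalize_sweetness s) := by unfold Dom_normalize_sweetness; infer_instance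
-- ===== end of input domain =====

-- B replaces A's keyword-driven cascade of any() substring scans with a position-driven scan of the text that maintains a running minimum keyword priority (alternative decomposition, same asymptotic cost).


-- ===== PORT A =====
-- _norm(s): None -> "", else str(s).strip()
def pyNorm (s : Option String) : String :=
  match s with
  | none => ""
  | some t => PySem.Str.strip t

-- _norm_lc(s) = _norm(s).lower()
def pyNormLc (s : Option String) : String := PySem.Str.lower (pyNorm s)

def normalize_sweetness (s : String) : String :=
  let v := pyNormLc (some s)
  if v = "" then ""
  else if ["secco", "dry", "brut", "extra brut", "pas dos", "dosage zero", "nature"].any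
            (fun k => PySem.Str.isIn k v) then "secco"
  else if ["abbocc", "off-dry", "off dry"].any (fun k => PySem.Str.isIn k v) then "abboccato"
  else if ["amabile", "semi-sweet", "semi sweet"].any (fun k => PySem.Str.isIn k v) then "amabile"
  else if ["dolce", "sweet", "demi-sec", "demisec", "doux"].any (fun k => PySem.Str.isIn k v) then "dolce"
  else v

-- ===== PORT B =====
-- the keyword → priority table _KW
def pvKw : List (String × Nat) :=
  [("secco", 0), ("dry", 0), ("brut", 0), ("extra brut", 0),
   ("pas dos", 0), ("dosage zero", 0), ("nature", 0),
   ("abbocc", 1), ("off-dry", 1), ("off dry", 1),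
   ("amabile", 2), ("semi-sweet", 2), ("semi sweet", 2),
   ("dolce", 3), ("sweet", 3), ("demi-sec", 3), ("demisec", 3), ("doux", 3)]

def pvLabels : List String := ["secco", "abboccato", "amabile", "dolce"]

-- inner loop body: 'for kw, pri in _KW: if pri < best and v.startswith(kw, i): best = pri'
-- (v.startswith(kw, i) with 0 ≤ i ≤ len(v) is exactly: kw.toList is a prefix of v.toList.drop i)
def pvInner (chars : List Char) (i : Nat) (best : Nat) : Nat :=
  pvKw.foldl (fun b p =>
    if p.2 < b ∧ PySem.Chars.startswith (chars.drop i) p.1.toList = true then p.2 else b) best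

def normalize_sweetness_alt (s : String) : String :=
  let v := PySem.Str.lower (PySem.Str.strip s)
  if v = "" then ""
  else
    let best := (List.range v.toList.length).foldl (fun b i => pvInner v.toList i b) 4
    if best < 4 then pvLabels.getD best v else v

-- ===== PRECONDITION & SPEC =====
def Spec_normalize_sweetness (s : String) (out : String) : Prop := out = normalize_sweetness_alt s
instance (s : String) (out : String) : Decidable (Spec_normalize_sweetness s out) := by unfold Spec_normalize_sweetness; infer_instance

-- ===== CLAIM (what is proved, stated in full; the proofs are below) =====
def Claim_equal_normalize_sweetness : Prop := ∀ (s : String), Dom_normalize_sweetness s → Spec_normalize_sweetness s (normalize_sweetness s)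

-- ===== LEMMAS AND PROOFS =====

-- the match condition of one (position, (keyword, priority)) pair
def pvMatch (chars : List Char) (q : Nat × (String × Nat)) : Bool :=
  PySem.Chars.startswith (chars.drop q.1) q.2.1.toList

-- the flattened pair list the double loop walks
def pvL (chars : List Char) : List (Nat × (String × Nat)) :=
  (List.range chars.length).flatMap (fun i => pvKw.map (fun p => (i, p)))

def pvF (chars : List Char) (b : Nat) (q : Nat × (String × Nat)) : Nat :=
  if q.2.2 < b ∧ pvMatch chars q = true then q.2.2 else b

-- the double fold equals a single fold over the flattened list
lemma double_fold_eq (chars : List Char) (b : Nat) :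
    (List.range chars.length).foldl (fun b i => pvInner chars i b) b
      = (pvL chars).foldl (pvF chars) b := by
  unfold pvL pvInner
  generalize List.range chars.length = xs
  induction xs generalizing b with
  | nil => rfl
  | cons x xs ih =>
    simp only [List.foldl_cons, List.flatMap_cons, List.foldl_append, ih, List.foldl_map]
    rfl

lemma pvF_le (chars : List Char) (b : Nat) (q : Nat × (String × Nat)) : pvF chars b q ≤ b := by
  unfold pvF; split_ifs with h
  · omega
  · exact le_rfl

lemma fold_le (chars : List Char) (L : List (Nat × (String × Nat))) (b : Nat) :
    L.foldl (pvF chars) b ≤ b := by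
  induction L generalizing b with
  | nil => exact le_rfl
  | cons q L ih => exact le_trans (ih (pvF chars b q)) (pvF_le chars b q)

lemma fold_reach (chars : List Char) (L : List (Nat × (String × Nat))) (b : Nat) :
    L.foldl (pvF chars) b = b ∨
      ∃ q ∈ L, pvMatch chars q = true ∧ L.foldl (pvF chars) b = q.2.2 := by
  induction L generalizing b with
  | nil => exact Or.inl rfl
  | cons q L ih =>
    rcases ih (pvF chars b q) with h | ⟨r, hr, hm, he⟩
    · rw [List.foldl_cons, h]
      unfold pvF; split_ifs with hc
      · exact Or.inr ⟨q, List.mem_cons_self .., hc.2, rfl⟩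
      · exact Or.inl rfl
    · exact Or.inr ⟨r, List.mem_cons_of_mem _ hr, hm, by rw [List.foldl_cons]; exact he⟩

lemma fold_min (chars : List Char) (L : List (Nat × (String × Nat))) (b : Nat) :
    ∀ q ∈ L, pvMatch chars q = true → L.foldl (pvF chars) b ≤ q.2.2 := by
  induction L generalizing b with
  | nil => intro q hq; cases hq
  | cons r L ih =>
    intro q hq hm
    rcases List.mem_cons.mp hq with rfl | hq'
    · rw [List.foldl_cons]
      refine le_trans (fold_le chars L _) ?_
      unfold pvF; split_ifs with h
      · exact le_rfl
      · simp only [hm, and_true, not_lt] at h; exact h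
    · rw [List.foldl_cons]; exact ih (pvF chars b r) q hq' hm

-- "keyword kw matches at some position of the scan"
def pvHit (chars : List Char) (kw : String) : Prop :=
  ∃ i, i < chars.length ∧ pvMatch chars (i, (kw, 0)) = true

lemma hit_iff (chars : List Char) (kw : String) (hv : chars ≠ []) :
    pvHit chars kw ↔ PySem.Chars.isIn kw.toList chars = true := by
  unfold pvHit pvMatch
  simp only [PySem.Chars.startswith_iff]
  rw [← PySem.Chars.exists_prefix_drop_iff_isIn]
  constructor
  · rintro ⟨i, _, h⟩; exact ⟨i, h⟩
  · rintro ⟨j, h⟩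
    by_cases hj : j < chars.length
    · exact ⟨j, hj, h⟩
    · have hd : chars.drop j = [] := List.drop_eq_nil_of_le (by omega)
      rw [hd] at h
      have hk : kw.toList = [] := List.prefix_nil.mp h
      exact ⟨0, List.length_pos_iff.mpr hv, by simp [hk]⟩

-- the L-existential in terms of per-keyword hits
lemma exists_L_iff (chars : List Char) (pri : Nat) :
    (∃ q ∈ pvL chars, pvMatch chars q = true ∧ q.2.2 = pri)
      ↔ ∃ p ∈ pvKw, p.2 = pri ∧ pvHit chars p.1 := by
  unfold pvL pvHit
  constructor
  · rintro ⟨⟨i, kw, pr⟩, hq, hm, rfl⟩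
    simp only [List.mem_flatMap, List.mem_range, List.mem_map] at hq
    rcases hq with ⟨j, hj, p, hp, he⟩
    cases he
    exact ⟨(kw, pr), hp, rfl, i, hj, hm⟩
  · rintro ⟨⟨kw, pr⟩, hp, rfl, i, hi, hm⟩
    refine ⟨(i, (kw, pr)), ?_, hm, rfl⟩
    simp only [List.mem_flatMap, List.mem_range, List.mem_map]
    exact ⟨i, hi, (kw, pr), hp, rfl⟩

-- per-group bridges: the priority-pri keywords of pvKw hit somewhere iff A's any() fires
lemma group0_iff (v : String) (hv : v.toList ≠ []) :
    (∃ p ∈ pvKw, p.2 = 0 ∧ pvHit v.toList p.1)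
      ↔ (["secco", "dry", "brut", "extra brut", "pas dos", "dosage zero", "nature"].any (fun k => PySem.Str.isIn k v) = true) := by
  simp [pvKw, hit_iff _ _ hv]

lemma group1_iff (v : String) (hv : v.toList ≠ []) :
    (∃ p ∈ pvKw, p.2 = 1 ∧ pvHit v.toList p.1)
      ↔ (["abbocc", "off-dry", "off dry"].any (fun k => PySem.Str.isIn k v) = true) := by
  simp [pvKw, hit_iff _ _ hv]

lemma group2_iff (v : String) (hv : v.toList ≠ []) :
    (∃ p ∈ pvKw, p.2 = 2 ∧ pvHit v.toList p.1)
      ↔ (["amabile", "semi-sweet", "semi sweet"].any (fun k => PySem.Str.isIn k v) = true) := by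
  simp [pvKw, hit_iff _ _ hv]

lemma group3_iff (v : String) (hv : v.toList ≠ []) :
    (∃ p ∈ pvKw, p.2 = 3 ∧ pvHit v.toList p.1)
      ↔ (["dolce", "sweet", "demi-sec", "demisec", "doux"].any (fun k => PySem.Str.isIn k v) = true) := by
  simp [pvKw, hit_iff _ _ hv]

lemma pvKw_pri_lt : ∀ p ∈ pvKw, p.2 < 4 := by decide

-- the running minimum of B equals the branch index of A's cascade
lemma best_char (v : String) (hv : v.toList ≠ []) :
    (List.range v.toList.length).foldl (fun b i => pvInner v.toList i b) 4
      = if ["secco", "dry", "brut", "extra brut", "pas dos", "dosage zero", "nature"].any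
             (fun k => PySem.Str.isIn k v) then 0
        else if ["abbocc", "off-dry", "off dry"].any (fun k => PySem.Str.isIn k v) then 1
        else if ["amabile", "semi-sweet", "semi sweet"].any (fun k => PySem.Str.isIn k v) then 2
        else if ["dolce", "sweet", "demi-sec", "demisec", "doux"].any (fun k => PySem.Str.isIn k v) then 3
        else 4 := by
  rw [double_fold_eq]
  have h_le := fold_le v.toList (pvL v.toList) 4
  have h_reach := fold_reach v.toList (pvL v.toList) 4
  have h_min := fold_min v.toList (pvL v.toList) 4
  set best := (pvL v.toList).foldl (pvF v.toList) 4 with hbest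
  have hub : ∀ pri, (∃ p ∈ pvKw, p.2 = pri ∧ pvHit v.toList p.1) → best ≤ pri := by
    intro pri hp
    rcases (exists_L_iff v.toList pri).mpr hp with ⟨q, hq, hm, hpri⟩
    exact hpri ▸ h_min q hq hm
  have hr : best = 4 ∨ ∃ p ∈ pvKw, p.2 = best ∧ pvHit v.toList p.1 := by
    rcases h_reach with h | ⟨q, hq, hm, he⟩
    · exact Or.inl h
    · refine Or.inr ((exists_L_iff v.toList best).mp ⟨q, hq, hm, he.symm⟩)
  split_ifs with h0 h1 h2 h3
  · have := hub 0 ((group0_iff v hv).mpr h0); omega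
  · have hu := hub 1 ((group1_iff v hv).mpr h1)
    rcases hr with h | ⟨p, hp, hpri, hh⟩
    · omega
    · have h4 := pvKw_pri_lt p hp
      by_contra hne
      have : best = 0 := by omega
      exact h0 ((group0_iff v hv).mp ⟨p, hp, by omega, hh⟩)
  · have hu := hub 2 ((group2_iff v hv).mpr h2)
    rcases hr with h | ⟨p, hp, hpri, hh⟩
    · omega
    · by_contra hne
      rcases (by omega : best = 0 ∨ best = 1) with hb | hb
      · exact h0 ((group0_iff v hv).mp ⟨p, hp, by omega, hh⟩)
      · exact h1 ((group1_iff v hv).mp ⟨p, hp, by omega, hh⟩)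
  · have hu := hub 3 ((group3_iff v hv).mpr h3)
    rcases hr with h | ⟨p, hp, hpri, hh⟩
    · omega
    · by_contra hne
      rcases (by omega : best = 0 ∨ best = 1 ∨ best = 2) with hb | hb | hb
      · exact h0 ((group0_iff v hv).mp ⟨p, hp, by omega, hh⟩)
      · exact h1 ((group1_iff v hv).mp ⟨p, hp, by omega, hh⟩)
      · exact h2 ((group2_iff v hv).mp ⟨p, hp, by omega, hh⟩)
  · rcases hr with h | ⟨p, hp, hpri, hh⟩
    · exact h
    · exfalso
      have h4 := pvKw_pri_lt p hp
      rcases (by omega : best = 0 ∨ best = 1 ∨ best = 2 ∨ best = 3) with hb | hb | hb | hb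
      · exact h0 ((group0_iff v hv).mp ⟨p, hp, by omega, hh⟩)
      · exact h1 ((group1_iff v hv).mp ⟨p, hp, by omega, hh⟩)
      · exact h2 ((group2_iff v hv).mp ⟨p, hp, by omega, hh⟩)
      · exact h3 ((group3_iff v hv).mp ⟨p, hp, by omega, hh⟩)

-- ===== VERDICT (by name: the statement is the Claim_ definition above) =====
theorem normalize_sweetness_spec : Claim_equal_normalize_sweetness := by
  intro s _
  unfold Spec_normalize_sweetness normalize_sweetness normalize_sweetness_alt pyNormLc pyNorm
  set v := PySem.Str.lower (PySem.Str.strip s) with hvdef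
  by_cases hv : v = ""
  · simp [hv]
  · have hvl : v.toList ≠ [] := fun h => hv (String.toList_eq_nil_iff.mp h)
    rw [if_neg hv, if_neg hv, best_char v hvl]
    split_ifs <;> simp [pvLabels]
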